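-- pv_equiv track=rewrite | github.com/kwame-Owusu/SlothBytes | py/nearest_vowel.py | nearest_vowel
-- ===== SOURCE A (Python) =====
-- def nearest_vowel(letter: str) -> str:
--     letter = letter.lower()
--     vowels = ["a", "e", "i", "o", "u"]
--     min_distance = float('inf')
--     nearest_vowel = ""
--     for vowel in vowels:
--         # Calculate the absolute distance between the letter and the vowel
--         distance = abs(ord(letter) - ord(vowel))
--
--         if distance < min_distance:
--             min_distance = distance
--             nearest_vowel = vowel
--     return nearest_vowel
-- ===== SOURCE B (Python) =====
-- def nearest_vowel(letter: str) -> str: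
--     v = ord(letter.lower())
--     # thresholds are the midpoints between adjacent vowels' ASCII codes;
--     # ties resolve to the earlier vowel, as in the scanning version
--     if v <= 99:
--         return "a"
--     if v <= 103:
--         return "e"
--     if v <= 108:
--         return "i"
--     if v <= 114:
--         return "o"
--     return "u"
-- ===== Notes on version B (the rewrite author's own statement) =====
-- stated objective: alternative
-- what changed: Replaces the min-tracking scan over the vowel list by a closed-form interval lookup: one ord of the lowered letter compared against the midpoints between adjacent vowels.
import Mathlib
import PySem

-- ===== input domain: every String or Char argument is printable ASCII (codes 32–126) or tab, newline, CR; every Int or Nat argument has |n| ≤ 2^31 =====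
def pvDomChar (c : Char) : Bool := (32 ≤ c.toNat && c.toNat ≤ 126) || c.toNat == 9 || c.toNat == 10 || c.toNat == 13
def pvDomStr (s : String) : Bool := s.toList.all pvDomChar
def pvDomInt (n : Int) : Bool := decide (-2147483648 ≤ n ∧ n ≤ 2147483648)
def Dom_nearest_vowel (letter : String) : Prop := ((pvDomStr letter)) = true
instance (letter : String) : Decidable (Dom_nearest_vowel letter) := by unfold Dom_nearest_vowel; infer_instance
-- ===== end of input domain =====

-- B replaces A's min-tracking scan over the vowel list by a closed-form interval
-- lookup on the letter's code (same result; an alternative decomposition, not faster).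

-- ===== PORT A =====
-- Python's float('inf') initial minimum is modelled as Option Int with none = inf
-- (exact: all distances are integers, so the first comparison 'distance < inf' is
-- always true, i.e. the 'none' branch). ord(letter) needs a single character: the
-- '_ => ""' match arm is unreachable under Pre_ (Python raises TypeError there).
def nearest_vowel (letter : String) : String :=
  match (PySem.Str.lower letter).toList with
  | [c] =>
    let n : Int := (c.toNat : Int)
    (List.foldl
      (fun (st : Option Int × String) (v : Char) =>
        let d : Int := (n - (v.toNat : Int)).natAbs
        match st.1 with
        | none => (some d, String.ofList [v])
        | some m => if d < m then (some d, String.ofList [v]) else st)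
      (none, "") ['a', 'e', 'i', 'o', 'u']).2
  | _ => ""

-- ===== PORT B =====
def nearest_vowel_alt (letter : String) : String :=
  let l := (PySem.Str.lower letter).toList
  if l.length = 1 then
    let v : Int := ((l.headD ' ').toNat : Int)
    if v ≤ 99 then "a"
    else if v ≤ 103 then "e"
    else if v ≤ 108 then "i"
    else if v ≤ 114 then "o"
    else "u"
  else ""

-- ===== PRECONDITION & SPEC =====
-- Python's ord raises TypeError unless the string has exactly one character.
def Pre_nearest_vowel (letter : String) : Prop := letter.length = 1
instance (letter : String) : Decidable (Pre_nearest_vowel letter) := by unfold Pre_nearest_vowel; infer_instance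
def pvWitness_nearest_vowel : String := "b"

def Spec_nearest_vowel (letter : String) (out : String) : Prop := out = nearest_vowel_alt letter
instance (letter : String) (out : String) : Decidable (Spec_nearest_vowel letter out) := by unfold Spec_nearest_vowel; infer_instance

-- ===== CLAIM (what is proved, stated in full; the proofs are below) =====
def Claim_equal_nearest_vowel : Prop := ∀ (letter : String), Dom_nearest_vowel letter → Pre_nearest_vowel letter → Spec_nearest_vowel letter (nearest_vowel letter)

-- ===== LEMMAS AND PROOFS =====

-- ===== VERDICT (by name: the statement is the Claim_ definition above) =====
theorem nearest_vowel_spec : Claim_equal_nearest_vowel := by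
  intro letter _ hpre
  unfold Spec_nearest_vowel nearest_vowel nearest_vowel_alt
  have hlen : (PySem.Str.lower letter).toList.length = 1 := by
    rw [PySem.Str.toList_lower]
    simp only [PySem.Chars.lower, List.length_map, String.length_toList]
    exact hpre
  obtain ⟨c, hc⟩ := List.length_eq_one_iff.mp hlen
  rw [hc]
  simp only [List.foldl, List.length_cons, List.length_nil, List.headD_cons,
    show ((('a' : Char).toNat : Int)) = 97 from rfl,
    show ((('e' : Char).toNat : Int)) = 101 from rfl,
    show ((('i' : Char).toNat : Int)) = 105 from rfl,
    show ((('o' : Char).toNat : Int)) = 111 from rfl,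
    show ((('u' : Char).toNat : Int)) = 117 from rfl]
  split_ifs <;>
    (repeat' (dsimp only [Prod.fst]; try split_ifs)) <;>
    first | rfl | (exfalso; omega)
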